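-- pv_equiv track=rewrite | github.com/TYDTYD/Algorithm_Study | 백준/Gold/13023. ABCDE/ABCDE.py | dfs
-- ===== SOURCE A (Python) =====
-- def dfs(graph,v,visited,count):
--     visited[v]=True
--     if count==4:
--         return True
--     for i in graph[v]:
--         if not visited[i]:
--             if dfs(graph,i,visited,count+1):
--                 return True
--             visited[i]=False # 이걸 추가하면 맞고 제거하면 틀린다?
--     return False
-- ===== SOURCE B (Python) =====
-- def dfs(graph, v, visited, count):
--     # Return-value re-implementation: searches with an explicit immutable path
--     # over a frozen copy of `visited` instead of A's mutate-and-restore scheme.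
--     # (A also mutates `visited` along the way; B only marks the start node.)
--     visited[v] = True
--
--     def ok(node, path, remaining):
--         if remaining == 0:
--             return True
--         for i in graph[node]:
--             if not visited[i] and i not in path:
--                 if ok(i, path + (i,), remaining - 1):
--                     return True
--         return False
--
--     return ok(v, (), 4 - count)
-- ===== Notes on version B (the rewrite author's own statement) =====
-- stated objective: alternative
-- what changed: B replaces A's mutate-and-restore boolean visited array with a pure recursive search that carries an explicit immutable path tuple and counts remaining edges down, so no backtracking resets of visited are needed (return-value equivalence; A additionally mutates visited along the search, B only marks the start node).
-- outside the precondition, e.g. on dfs([[1], [-1]], 0, [False, False], 2): A returns False, B returns True; on dfs([[1, 5], [0]], 0, [False, False], 3): A returns True, B returns True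
import Mathlib
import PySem

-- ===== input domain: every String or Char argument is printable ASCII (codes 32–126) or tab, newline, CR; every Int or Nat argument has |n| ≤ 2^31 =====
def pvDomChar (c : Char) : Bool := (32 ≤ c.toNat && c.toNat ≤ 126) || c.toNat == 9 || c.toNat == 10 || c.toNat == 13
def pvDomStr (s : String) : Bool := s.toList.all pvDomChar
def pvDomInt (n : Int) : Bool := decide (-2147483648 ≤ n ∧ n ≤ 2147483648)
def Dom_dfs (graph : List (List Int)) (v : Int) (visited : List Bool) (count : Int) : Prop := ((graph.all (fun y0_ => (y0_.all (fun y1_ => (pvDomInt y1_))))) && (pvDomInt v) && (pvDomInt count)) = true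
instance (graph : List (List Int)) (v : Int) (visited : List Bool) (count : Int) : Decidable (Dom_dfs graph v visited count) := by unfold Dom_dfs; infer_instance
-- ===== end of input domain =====

-- B replaces A's mutate-and-restore visited array with a pure search over an explicit
-- immutable path (alternative decomposition, no speed claim). Both Pythons mutate
-- `visited` (A along the whole search, B only visited[v]); the equivalence proved
-- here is about the RETURN VALUE only.

-- ===== PORT A =====
-- A is recursive with a for-loop; the loop is the helper `dfsLoopA` (taking the
-- recursive call as `rec`), the recursion is made total with a fuel argument
-- (recursion depth is bounded by the number of False entries, ≤ visited.length).
def dfsLoopA (rec : Int → List Bool → Int → Bool × List Bool) :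
    List Int → List Bool → Int → Bool × List Bool
  | [], vis, _ => (false, vis)
  | i :: rest, vis, c =>
      if PySem.List.pyGetD vis i false then dfsLoopA rec rest vis c
      else
        let r := rec i vis (c + 1)
        if r.1 then (true, r.2)
        else dfsLoopA rec rest (PySem.List.pySetD r.2 i false) c

def dfsFuel (graph : List (List Int)) : Nat → Int → List Bool → Int → Bool × List Bool
  | 0, _, vis, _ => (false, vis)                -- unreachable with the fuel used below
  | fuel + 1, v, vis, c =>
      let vis1 := PySem.List.pySetD vis v true  -- visited[v] = True
      if c = 4 then (true, vis1)
      else dfsLoopA (fun i w c' => dfsFuel graph fuel i w c')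
             (PySem.List.pyGetD graph v []) vis1 c

def dfs (graph : List (List Int)) (v : Int) (visited : List Bool) (count : Int) : Bool :=
  (dfsFuel graph (visited.length + 1) v visited count).1

-- ===== PORT B =====
-- Source B: a frozen visited (with v marked), an explicit immutable path, remaining edges
-- counted down; the for-loop is `okLoopB`, the recursion `okFuel` (same fuel bound).
def okLoopB (rec : Int → List Int → Int → Bool) (vis0 : List Bool) :
    List Int → List Int → Int → Bool
  | [], _, _ => false
  | i :: rest, path, rem =>
      if !(PySem.List.pyGetD vis0 i false) && !(path.contains i) then
        if rec i (path ++ [i]) (rem - 1) then true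
        else okLoopB rec vis0 rest path rem
      else okLoopB rec vis0 rest path rem

def okFuel (graph : List (List Int)) (vis0 : List Bool) : Nat → Int → List Int → Int → Bool
  | 0, _, _, _ => false                          -- unreachable with the fuel used below
  | fuel + 1, n, path, rem =>
      if rem = 0 then true
      else okLoopB (fun i p r => okFuel graph vis0 fuel i p r) vis0
             (PySem.List.pyGetD graph n []) path rem

def dfs_alt (graph : List (List Int)) (v : Int) (visited : List Bool) (count : Int) : Bool :=
  let vis0 := PySem.List.pySetD visited v true   -- visited[v] = True
  okFuel graph vis0 (visited.length + 1) v [] (4 - count)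

-- ===== PRECONDITION & SPEC =====
-- Pre_ excludes inputs where A raises (visited[v] or graph[v] out of range, an
-- out-of-range adjacency entry the search follows) and, beyond that, restricts to
-- well-formed adjacency lists: every entry is a canonical in-range index or points
-- at an already-visited position (such entries are always skipped). This is slightly
-- stronger than the exact crash condition — it also excludes inputs A survives only
-- via Python's negative-index wraparound on unvisited adjacency entries, or because
-- an out-of-range entry is never reached (see claim cites).
def Pre_dfs (graph : List (List Int)) (v : Int) (visited : List Bool) (count : Int) : Prop :=
  PySem.Raise.InRange visited.length v ∧
  (count = 4 ∨
    (PySem.Raise.InRange graph.length v ∧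
      ∀ l ∈ graph, ∀ i ∈ l,
        (0 ≤ i ∧ i.toNat < graph.length ∧ i.toNat < visited.length) ∨
        PySem.List.pyGetD (PySem.List.pySetD visited v true) i false = true))
instance (graph : List (List Int)) (v : Int) (visited : List Bool) (count : Int) : Decidable (Pre_dfs graph v visited count) := by unfold Pre_dfs; infer_instance

def pvWitness_dfs : List (List Int) × Int × List Bool × Int := ([[1], [0]], 0, [false, false], 0)

def Spec_dfs (graph : List (List Int)) (v : Int) (visited : List Bool) (count : Int) (out : Bool) : Prop := out = dfs_alt graph v visited count
instance (graph : List (List Int)) (v : Int) (visited : List Bool) (count : Int) (out : Bool) : Decidable (Spec_dfs graph v visited count out) := by unfold Spec_dfs; infer_instance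

-- ===== CLAIM (what is proved, stated in full; the proofs are below) =====
def Claim_equal_dfs : Prop := ∀ (graph : List (List Int)) (v : Int) (visited : List Bool) (count : Int), Dom_dfs graph v visited count → Pre_dfs graph v visited count → Spec_dfs graph v visited count (dfs graph v visited count)

-- ===== LEMMAS AND PROOFS =====

-- A's visited state at a node = the frozen vis0 with the current path marked True.
def pvMarks (vis : List Bool) (p : List Int) : List Bool :=
  p.foldl (fun w i => PySem.List.pySetD w i true) vis

-- canonical in-range index (for graph and for a visited list of length N)
def pvOk (g N : Nat) (i : Int) : Prop := 0 ≤ i ∧ i.toNat < g ∧ i.toNat < N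

-- adjacency entry admitted by Pre_: canonical, or pointing at a True cell of vis0
def pvOkE (g N : Nat) (vis0 : List Bool) (i : Int) : Prop :=
  (0 ≤ i ∧ i.toNat < g ∧ i.toNat < N) ∨ PySem.List.pyGetD vis0 i false = true

theorem pvIdx_lt (n : Nat) (i : Int) (j : Nat) (h : PySem.List.pyIdx? n i = some j) :
    j < n := by
  simp only [PySem.List.pyIdx?] at h
  split_ifs at h with h1 h2 h3 <;> simp_all <;> omega

-- setting a cell to True never turns a True read into a False one
theorem pvMono_set (vis : List Bool) (v i : Int)
    (h : PySem.List.pyGetD vis i false = true) :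
    PySem.List.pyGetD (PySem.List.pySetD vis v true) i false = true := by
  cases hv : PySem.List.pyIdx? vis.length v with
  | none => simpa [PySem.List.pySetD, PySem.List.pySet?, hv] using h
  | some k =>
    have hk := pvIdx_lt _ _ _ hv
    cases hi : PySem.List.pyIdx? vis.length i with
    | none =>
      rw [PySem.List.pyGetD, PySem.List.pyGet?, hi] at h
      simp at h
    | some j =>
      have hj := pvIdx_lt _ _ _ hi
      rw [PySem.List.pyGetD, PySem.List.pyGet?, hi] at h
      simp only [Option.bind_some , List.getElem?_eq_getElem hj] at h
      rw [PySem.List.pySetD, PySem.List.pySet?, hv]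
      rw [PySem.List.pyGetD, PySem.List.pyGet?]
      simp only [Option.map_some, Option.getD_some, List.length_set, hi]
      have hj' : j < (vis.set k true).length := by simpa using hj
      simp only [Option.bind_some, List.getElem?_eq_getElem hj', Option.getD_some,
        List.getElem_set]
      split
      · rfl
      · simpa using h

theorem pvSet_eq_self {l : List Bool} {k : Nat} {b : Bool} (hk : k < l.length)
    (h : l[k] = b) : l.set k b = l := by
  apply List.ext_getElem (by simp)
  intro n h1 h2
  simp only [List.getElem_set]
  split
  · next heq => subst heq; exact h.symm
  · rfl

theorem pvCount_set {l : List Bool} {k : Nat} (hk : k < l.length) (h : l[k] = false) :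
    (l.set k true).count false + 1 = l.count false := by
  induction l generalizing k with
  | nil => simp at hk
  | cons a tl ih =>
    cases k with
    | zero => simp_all
    | succ k =>
      simp only [List.set_cons_succ, List.count_cons]
      have := ih (k := k) (by simpa using hk) (by simpa using h)
      omega

theorem pvCount_pos {l : List Bool} {k : Nat} (hk : k < l.length) (h : l[k] = false) :
    0 < l.count false := by
  rw [List.count_pos_iff]
  exact h ▸ List.getElem_mem hk

-- pyGetD/pySetD on canonical Int indices, phrased for this file
theorem pvGet_eq {vis : List Bool} {i : Int} (h0 : 0 ≤ i) (h : i.toNat < vis.length) :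
    PySem.List.pyGetD vis i false = vis[i.toNat] := by
  rw [PySem.List.pyGetD_eq_getElem vis false h0 (by omega)]

theorem pvSet_eq {vis : List Bool} {i : Int} (b : Bool) (h0 : 0 ≤ i) :
    PySem.List.pySetD vis i b = vis.set i.toNat b :=
  PySem.List.pySetD_of_nonneg vis b h0

theorem pvGet_set {vis : List Bool} {i j : Int} (b : Bool)
    (hi : 0 ≤ i) (hil : i.toNat < vis.length) (hj : 0 ≤ j) (hjl : j.toNat < vis.length) :
    PySem.List.pyGetD (PySem.List.pySetD vis j b) i false
      = if i = j then b else PySem.List.pyGetD vis i false := by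
  rw [pvSet_eq b hj, pvGet_eq hi (by simpa using hil), pvGet_eq hi hil]
  rw [List.getElem_set]
  by_cases hij : i = j
  · subst hij; simp
  · have hne : j.toNat ≠ i.toNat := by omega
    simp [hne, hij]

theorem pvMarks_nil (vis : List Bool) : pvMarks vis [] = vis := rfl

theorem pvMarks_cons (vis : List Bool) (j : Int) (p : List Int) :
    pvMarks vis (j :: p) = pvMarks (PySem.List.pySetD vis j true) p := rfl

theorem pvMarks_append (vis : List Bool) (p : List Int) (i : Int) :
    pvMarks vis (p ++ [i]) = PySem.List.pySetD (pvMarks vis p) i true := by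
  simp [pvMarks, List.foldl_append]

theorem pvMarks_length (p : List Int) (vis : List Bool) :
    (pvMarks vis p).length = vis.length := by
  induction p generalizing vis with
  | nil => rfl
  | cons j p ih => rw [pvMarks_cons, ih, PySem.List.length_pySetD]

theorem pvGet_marks (p : List Int) (vis : List Bool) (i : Int)
    (hp : ∀ j ∈ p, 0 ≤ j ∧ j.toNat < vis.length)
    (h0 : 0 ≤ i) (hl : i.toNat < vis.length) :
    PySem.List.pyGetD (pvMarks vis p) i false
      = (PySem.List.pyGetD vis i false || p.contains i) := by
  induction p generalizing vis with
  | nil => simp [pvMarks_nil]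
  | cons j rest ih =>
    obtain ⟨hj0, hjl⟩ := hp j (List.mem_cons_self)
    rw [pvMarks_cons, ih (PySem.List.pySetD vis j true)
          (fun x hx => by
            have := hp x (List.mem_cons_of_mem _ hx)
            simpa [PySem.List.length_pySetD] using this)
          (by simpa [PySem.List.length_pySetD] using hl)]
    rw [pvGet_set true h0 hl hj0 hjl]
    by_cases hij : i = j
    · subst hij; simp
    · have : ¬ (i == j) = true := by simpa using hij
      simp [hij]


theorem pvMono_marks (p : List Int) (vis : List Bool) (i : Int)
    (h : PySem.List.pyGetD vis i false = true) :
    PySem.List.pyGetD (pvMarks vis p) i false = true := by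
  induction p generalizing vis with
  | nil => exact h
  | cons j rest ih => exact ih _ (pvMono_set vis j i h)

-- if A's call fails, it leaves visited = (entry visited with v marked True)
theorem pvRestoreLoop (graph : List (List Int)) (vis0 : List Bool) (N fuel : Nat)
    (hrec : ∀ (v : Int) (vis : List Bool) (c : Int), vis.length = N → pvOk graph.length N v →
      (∀ j : Int, PySem.List.pyGetD vis0 j false = true → PySem.List.pyGetD vis j false = true) →
      (PySem.List.pySetD vis v true).count false < fuel →
      (dfsFuel graph fuel v vis c).1 = false →
      (dfsFuel graph fuel v vis c).2 = PySem.List.pySetD vis v true) :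
    ∀ (L : List Int) (vis : List Bool) (c : Int),
      (∀ i ∈ L, pvOkE graph.length N vis0 i) → vis.length = N →
      (∀ j : Int, PySem.List.pyGetD vis0 j false = true → PySem.List.pyGetD vis j false = true) →
      vis.count false ≤ fuel →
      (dfsLoopA (fun i w c' => dfsFuel graph fuel i w c') L vis c).1 = false →
      (dfsLoopA (fun i w c' => dfsFuel graph fuel i w c') L vis c).2 = vis := by
  intro L
  induction L with
  | nil => intro vis c _ _ _ _ _; simp [dfsLoopA]
  | cons i rest ih =>
    intro vis c hL hlen hdom hfuel hfalse
    have hrest := fun x hx => hL x (List.mem_cons_of_mem _ hx)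
    simp only [dfsLoopA] at hfalse ⊢
    by_cases hvi : PySem.List.pyGetD vis i false = true
    · simp only [hvi, if_true] at hfalse ⊢
      exact ih vis c hrest hlen hdom hfuel hfalse
    · have hvi' : PySem.List.pyGetD vis i false = false := by simpa using hvi
      obtain ⟨hi0, hig, hiN⟩ : pvOk graph.length N i := by
        rcases hL i List.mem_cons_self with h | h
        · exact h
        · exact absurd (hdom i h) hvi
      simp only [hvi', Bool.false_eq_true, if_false] at hfalse ⊢
      have hgetn : vis[i.toNat] = false := by
        rw [← pvGet_eq hi0 (by omega)]; exact hvi'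
      have hpos : 0 < vis.count false := pvCount_pos (by omega) hgetn
      have hcnt : (PySem.List.pySetD vis i true).count false + 1 = vis.count false := by
        rw [pvSet_eq true hi0]; exact pvCount_set (by omega) hgetn
      cases hr : (dfsFuel graph fuel i vis (c + 1)).1
      · simp only [hr, Bool.false_eq_true, if_false] at hfalse ⊢
        have hres := hrec i vis (c + 1) hlen ⟨hi0, hig, hiN⟩ hdom (by omega) hr
        rw [hres] at hfalse ⊢
        have hcancel : PySem.List.pySetD (PySem.List.pySetD vis i true) i false = vis := by
          rw [pvSet_eq true hi0, pvSet_eq false hi0, List.set_set]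
          exact pvSet_eq_self (by omega) hgetn
        rw [hcancel] at hfalse ⊢
        exact ih vis c hrest hlen hdom hfuel hfalse
      · simp [hr] at hfalse
  
theorem pvRestoreD (graph : List (List Int)) (vis0 : List Bool) (N : Nat)
    (hg : ∀ l ∈ graph, ∀ i ∈ l, pvOkE graph.length N vis0 i) :
    ∀ (fuel : Nat) (v : Int) (vis : List Bool) (c : Int), vis.length = N →
      pvOk graph.length N v →
      (∀ j : Int, PySem.List.pyGetD vis0 j false = true → PySem.List.pyGetD vis j false = true) →
      (PySem.List.pySetD vis v true).count false < fuel →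
      (dfsFuel graph fuel v vis c).1 = false →
      (dfsFuel graph fuel v vis c).2 = PySem.List.pySetD vis v true := by
  intro fuel
  induction fuel with
  | zero => intro v vis c _ _ _ h _; omega
  | succ f ih =>
    intro v vis c hlen hv hdom hfuel hfalse
    simp only [dfsFuel] at hfalse ⊢
    by_cases hc : c = 4
    · simp [hc] at hfalse
    · simp only [hc, if_false] at hfalse ⊢
      obtain ⟨hv0, hvg, hvN⟩ := hv
      have hvr : PySem.Raise.InRange graph.length v := ⟨by omega, by omega⟩
      have hmem : PySem.List.pyGetD graph v [] ∈ graph :=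
        PySem.List.pyGetD_mem graph [] hvr
      exact pvRestoreLoop graph vis0 N f ih (PySem.List.pyGetD graph v [])
        (PySem.List.pySetD vis v true) c (fun i hi => hg _ hmem i hi)
        (by rw [PySem.List.length_pySetD]; exact hlen)
        (fun j hj => pvMono_set vis v j (hdom j hj))
        (by omega) hfalse

-- the two loops agree when A's state is vis0 with `path` marked
theorem pvEqLoop (graph : List (List Int)) (vis0 : List Bool) (N fuel : Nat)
    (hg : ∀ l ∈ graph, ∀ i ∈ l, pvOkE graph.length N vis0 i) (hlen0 : vis0.length = N)
    (hrec : ∀ (n : Int) (path : List Int) (c : Int) (visA : List Bool),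
      pvOk graph.length N n → (∀ j ∈ path, pvOk graph.length N j) →
      PySem.List.pySetD visA n true = pvMarks vis0 path → visA.length = N →
      (pvMarks vis0 path).count false < fuel →
      (dfsFuel graph fuel n visA c).1 = okFuel graph vis0 fuel n path (4 - c)) :
    ∀ (L path : List Int) (c : Int),
      (∀ i ∈ L, pvOkE graph.length N vis0 i) → (∀ j ∈ path, pvOk graph.length N j) →
      (pvMarks vis0 path).count false ≤ fuel →
      (dfsLoopA (fun i w c' => dfsFuel graph fuel i w c') L (pvMarks vis0 path) c).1
        = okLoopB (fun i p r => okFuel graph vis0 fuel i p r) vis0 L path (4 - c) := by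
  intro L
  induction L with
  | nil => intro path c _ _ _; simp [dfsLoopA, okLoopB]
  | cons i rest ih =>
    intro path c hL hpath hfuel
    have hrest := fun x hx => hL x (List.mem_cons_of_mem _ hx)
    have hMlen : (pvMarks vis0 path).length = N := by rw [pvMarks_length]; exact hlen0
    simp only [dfsLoopA, okLoopB]
    by_cases hMi' : PySem.List.pyGetD (pvMarks vis0 path) i false = true
    · simp only [hMi', if_true]
      have hv0f : (PySem.List.pyGetD vis0 i false || path.contains i) = true := by
        rcases hL i List.mem_cons_self with ⟨hi0, hig, hiN⟩ | h
        · rw [← pvGet_marks path vis0 i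
            (fun j hj => ⟨(hpath j hj).1, by rw [hlen0]; exact (hpath j hj).2.2⟩)
            hi0 (by omega)]
          exact hMi'
        · simp [h]
      have hB : (!(PySem.List.pyGetD vis0 i false) && !(path.contains i)) = false := by
        cases h1 : PySem.List.pyGetD vis0 i false <;> simp_all
      simp only [hB, Bool.false_eq_true, if_false]
      exact ih path c hrest hpath hfuel
    · have hMif : PySem.List.pyGetD (pvMarks vis0 path) i false = false := by
        simpa using hMi'
      obtain ⟨hi0, hig, hiN⟩ : pvOk graph.length N i := by
        rcases hL i List.mem_cons_self with h | h
        · exact h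
        · exact absurd (pvMono_marks path vis0 i h) hMi'
      have hMi : PySem.List.pyGetD (pvMarks vis0 path) i false
          = (PySem.List.pyGetD vis0 i false || path.contains i) :=
        pvGet_marks path vis0 i
          (fun j hj => ⟨(hpath j hj).1, by rw [hlen0]; exact (hpath j hj).2.2⟩)
          hi0 (by omega)
      have hor : (PySem.List.pyGetD vis0 i false || path.contains i) = false := by
        rw [← hMi]; exact hMif
      have hB : (!(PySem.List.pyGetD vis0 i false) && !(path.contains i)) = true := by
        cases h1 : PySem.List.pyGetD vis0 i false <;> simp_all
      simp only [hMif, Bool.false_eq_true, if_false, hB, if_true]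
      have hgetn : (pvMarks vis0 path)[i.toNat] = false := by
        rw [← pvGet_eq hi0 (by omega)]; exact hMif
      have hpos : 0 < (pvMarks vis0 path).count false := pvCount_pos (by omega) hgetn
      have hcnt : (PySem.List.pySetD (pvMarks vis0 path) i true).count false + 1
          = (pvMarks vis0 path).count false := by
        rw [pvSet_eq true hi0]; exact pvCount_set (by omega) hgetn
      have hpath' : ∀ j ∈ path ++ [i], pvOk graph.length N j := by
        intro j hj
        rcases List.mem_append.1 hj with h | h
        · exact hpath j h
        · simp at h; subst h; exact ⟨hi0, hig, hiN⟩
      have hAB : (dfsFuel graph fuel i (pvMarks vis0 path) (c + 1)).1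
          = okFuel graph vis0 fuel i (path ++ [i]) (4 - (c + 1)) := by
        exact hrec i (path ++ [i]) (c + 1) (pvMarks vis0 path) ⟨hi0, hig, hiN⟩ hpath'
          (by rw [pvMarks_append]) hMlen (by rw [pvMarks_append]; omega)
      have hremeq : (4 : Int) - (c + 1) = 4 - c - 1 := by ring
      rw [hremeq] at hAB
      cases hr : (dfsFuel graph fuel i (pvMarks vis0 path) (c + 1)).1
      · have hok : okFuel graph vis0 fuel i (path ++ [i]) (4 - c - 1) = false := by
          rw [← hAB]; exact hr
        simp only [Bool.false_eq_true, if_false, hok]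
        have hres := pvRestoreD graph vis0 N hg fuel i (pvMarks vis0 path) (c + 1)
          hMlen ⟨hi0, hig, hiN⟩ (fun j hj => pvMono_marks path vis0 j hj) (by omega) hr
        rw [hres]
        have hcancel : PySem.List.pySetD (PySem.List.pySetD (pvMarks vis0 path) i true) i false
            = pvMarks vis0 path := by
          rw [pvSet_eq true hi0, pvSet_eq false hi0, List.set_set]
          exact pvSet_eq_self (by omega) hgetn
        rw [hcancel]
        exact ih path c hrest hpath hfuel
      · have hok : okFuel graph vis0 fuel i (path ++ [i]) (4 - c - 1) = true := by
          rw [← hAB]; exact hr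
        simp [hok]

theorem pvEqD (graph : List (List Int)) (vis0 : List Bool) (N : Nat)
    (hg : ∀ l ∈ graph, ∀ i ∈ l, pvOkE graph.length N vis0 i) (hlen0 : vis0.length = N) :
    ∀ (fuel : Nat) (n : Int) (path : List Int) (c : Int) (visA : List Bool),
      pvOk graph.length N n → (∀ j ∈ path, pvOk graph.length N j) →
      PySem.List.pySetD visA n true = pvMarks vis0 path → visA.length = N →
      (pvMarks vis0 path).count false < fuel →
      (dfsFuel graph fuel n visA c).1 = okFuel graph vis0 fuel n path (4 - c) := by
  intro fuel
  induction fuel with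
  | zero => intro n path c visA _ _ _ _ h; omega
  | succ f ih =>
    intro n path c visA hn hpath hA hlenA hfuel
    simp only [dfsFuel, okFuel]
    by_cases hc : c = 4
    · have : (4 : Int) - c = 0 := by omega
      simp [hc]
    · have hrem : ¬ ((4 : Int) - c = 0) := by omega
      simp only [hc, if_false, hrem]
      rw [hA]
      have hnr : PySem.Raise.InRange graph.length n := by
        obtain ⟨h1, h2, _⟩ := hn
        constructor <;> omega
      have hmem : PySem.List.pyGetD graph n [] ∈ graph :=
        PySem.List.pyGetD_mem graph [] hnr
      exact pvEqLoop graph vis0 N f hg hlen0 ih (PySem.List.pyGetD graph n []) path c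
        (fun i hi => hg _ hmem i hi) hpath (by omega)

-- ===== VERDICT (by name: the statement is the Claim_ definition above) =====
theorem dfs_spec : Claim_equal_dfs := by
  intro graph v visited count _hdom hpre
  show dfs graph v visited count = dfs_alt graph v visited count
  obtain ⟨hvr, hrest⟩ := hpre
  by_cases hc : count = 4
  · simp only [dfs, dfs_alt, dfsFuel, okFuel, hc]
    norm_num
  · rcases hrest with hc' | ⟨hvg, hgall⟩
    · exact absurd hc' hc
    have hg : ∀ l ∈ graph, ∀ i ∈ l,
        pvOkE graph.length visited.length (PySem.List.pySetD visited v true) i := by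
      intro l hl i hi
      rcases hgall l hl i hi with ⟨h1, h2, h3⟩ | h
      · exact Or.inl ⟨h1, h2, h3⟩
      · exact Or.inr h
    have hlen1 : (PySem.List.pySetD visited v true).length = visited.length :=
      PySem.List.length_pySetD visited v true
    have hrem : ¬ ((4 : Int) - count = 0) := by omega
    simp only [dfs, dfs_alt, dfsFuel, okFuel, hc, if_false, hrem]
    exact pvEqLoop graph (PySem.List.pySetD visited v true) visited.length visited.length
      hg hlen1
      (pvEqD graph (PySem.List.pySetD visited v true) visited.length hg hlen1 visited.length)
      (PySem.List.pyGetD graph v []) [] count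
      (fun i hi => hg _ (PySem.List.pyGetD_mem graph [] hvg) i hi)
      (by intro j hj; simp at hj)
      (by
        rw [pvMarks_nil]
        have := List.count_le_length (l := PySem.List.pySetD visited v true) (a := false)
        omega)
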